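-- pv_equiv track=rewrite | github.com/eltonfabricio10/python-bigtube | src/bigtube/main.py | _extract_cli_inputs
-- ===== SOURCE A (Python) =====
-- def _extract_cli_inputs(raw_args):
--     inputs = []
--     passthrough = False
--
--     for arg in raw_args:
--         if isinstance(arg, bytes):
--             arg = arg.decode(errors="replace")
--         if not arg:
--             continue
--
--         if not passthrough:
--             if arg == "--":
--                 passthrough = True
--                 continue
--             if arg.startswith("-"):
--                 continue
--
--         inputs.append(str(arg))
--
--     return inputs
-- ===== SOURCE B (Python) =====
-- def _extract_cli_inputs(raw_args):
--     args = [a.decode(errors="replace") if isinstance(a, bytes) else a for a in raw_args]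
--     try:
--         i = args.index("--")
--     except ValueError:
--         i = len(args)
--     inputs = [str(a) for a in args[:i] if a and not a.startswith("-")]
--     inputs += [str(a) for a in args[i + 1:] if a]
--     return inputs
-- ===== Notes on version B (the rewrite author's own statement) =====
-- stated objective: alternative
-- what changed: Replaces A's single flag-driven loop over a passthrough boolean with a split at the first '--' (via list.index) followed by two independent filtering passes over the two slices.
import Mathlib
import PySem

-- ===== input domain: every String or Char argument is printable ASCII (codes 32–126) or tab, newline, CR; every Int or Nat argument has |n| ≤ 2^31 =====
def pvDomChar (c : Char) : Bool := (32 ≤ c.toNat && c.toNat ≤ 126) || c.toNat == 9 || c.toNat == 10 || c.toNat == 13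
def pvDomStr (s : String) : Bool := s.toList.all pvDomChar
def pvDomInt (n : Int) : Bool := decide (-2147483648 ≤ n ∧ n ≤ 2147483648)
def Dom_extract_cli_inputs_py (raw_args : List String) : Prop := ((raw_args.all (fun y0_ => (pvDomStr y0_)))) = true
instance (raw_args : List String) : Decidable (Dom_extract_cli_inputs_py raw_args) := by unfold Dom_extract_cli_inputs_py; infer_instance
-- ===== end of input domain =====

-- B splits the arg list at the first "--" and makes two filtering passes instead of A's
-- flag-driven single loop; objective: simpler decomposition (no speed claim).

-- ===== PORT A =====
-- one step of A's loop over (inputs, passthrough)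
def pvStepA (st : List String × Bool) (arg : String) : List String × Bool :=
  if arg == "" then st
  else if !st.2 then
    if arg == "--" then (st.1, true)
    else if PySem.Str.startswith arg "-" then st
    else (st.1 ++ [arg], st.2)
  else (st.1 ++ [arg], st.2)

def extract_cli_inputs_py (raw_args : List String) : List String :=
  (raw_args.foldl pvStepA ([], false)).1

-- ===== PORT B =====
def extract_cli_inputs_py_alt (raw_args : List String) : List String :=
  let i : Nat := (PySem.List.index? raw_args "--").getD raw_args.length
  (PySem.List.slice raw_args none (some (i : Int))).filter
      (fun a => !(a == "") && !(PySem.Str.startswith a "-"))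
    ++ (PySem.List.slice raw_args (some ((i : Int) + 1)) none).filter (fun a => !(a == ""))

-- ===== PRECONDITION & SPEC =====
def Spec_extract_cli_inputs_py (raw_args : List String) (out : List String) : Prop := out = extract_cli_inputs_py_alt raw_args
instance (raw_args : List String) (out : List String) : Decidable (Spec_extract_cli_inputs_py raw_args out) := by unfold Spec_extract_cli_inputs_py; infer_instance

-- ===== CLAIM (what is proved, stated in full; the proofs are below) =====
def Claim_equal_extract_cli_inputs_py : Prop := ∀ (raw_args : List String), Dom_extract_cli_inputs_py raw_args → Spec_extract_cli_inputs_py raw_args (extract_cli_inputs_py raw_args)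

-- ===== LEMMAS AND PROOFS =====

-- reference form: what A's loop computes from the not-yet-passthrough state
def pvGo : List String → List String
  | [] => []
  | a :: t =>
    if a == "" then pvGo t
    else if a == "--" then t.filter (fun x => !(x == ""))
    else if PySem.Str.startswith a "-" then pvGo t
    else a :: pvGo t

lemma pvFoldA_true (l acc : List String) :
    l.foldl pvStepA (acc, true) = (acc ++ l.filter (fun x => !(x == "")), true) := by
  induction l generalizing acc with
  | nil => simp
  | cons a t ih =>
    by_cases h : a == "" <;>
      simp [pvStepA, h, ih]

lemma pvFoldA_false (l acc : List String) :
    (l.foldl pvStepA (acc, false)).1 = acc ++ pvGo l := by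
  induction l generalizing acc with
  | nil => simp [pvGo]
  | cons a t ih =>
    by_cases h1 : a == ""
    · simp [pvStepA, h1, pvGo, ih]
    · by_cases h2 : a == "--"
      · simp [pvStepA, h1, h2, pvGo, pvFoldA_true]
      · by_cases h3 : PySem.Chars.startswith a.toList ['-'] <;>
          simp [pvStepA, h1, h2, h3, pvGo, ih]

-- B's slices, rewritten as take/drop at the split index
lemma pvAlt_take_drop (l : List String) :
    extract_cli_inputs_py_alt l =
      (l.take ((PySem.List.index? l "--").getD l.length)).filter
          (fun a => !(a == "") && !(PySem.Str.startswith a "-"))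
        ++ (l.drop ((PySem.List.index? l "--").getD l.length + 1)).filter (fun x => !(x == "")) := by
  have key : ∀ n : Nat,
      (PySem.List.slice l none (some (n : Int))).filter
          (fun a => !(a == "") && !(PySem.Str.startswith a "-"))
        ++ (PySem.List.slice l (some ((n : Int) + 1)) none).filter (fun x => !(x == ""))
      = (l.take n).filter (fun a => !(a == "") && !(PySem.Str.startswith a "-"))
        ++ (l.drop (n + 1)).filter (fun x => !(x == "")) := by
    intro n
    rw [show ((n : Int) + 1) = ((n + 1 : Nat) : Int) by push_cast; ring,
      PySem.List.slice_to_natCast, PySem.List.slice_from_natCast]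
  unfold extract_cli_inputs_py_alt
  exact key _

lemma pvGo_cons (a : String) (t : List String) :
    pvGo (a :: t) =
      (if a == "" then pvGo t
       else if a == "--" then t.filter (fun x => !(x == ""))
       else if PySem.Str.startswith a "-" then pvGo t
       else a :: pvGo t) := rfl

-- the inductive step shared by both index? cases
lemma pvCons_step (a : String) (t : List String) (k : Nat) (hne : a ≠ "--")
    (ih : (t.take k).filter (fun a => !(a == "") && !(PySem.Str.startswith a "-"))
        ++ (t.drop (k + 1)).filter (fun x => !(x == "")) = pvGo t) :
    (a :: t.take k).filter (fun a => !(a == "") && !(PySem.Str.startswith a "-"))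
        ++ (t.drop (k + 1)).filter (fun x => !(x == "")) = pvGo (a :: t) := by
  rw [pvGo_cons, List.filter_cons]
  have h2' : ¬((a == "--") = true) := fun hh => hne (eq_of_beq hh)
  by_cases h1 : (a == "") = true
  · have hp : (!(a == "") && !(PySem.Str.startswith a "-")) = false := by rw [h1]; rfl
    rw [hp, if_neg (by simp), if_pos h1]
    exact ih
  · have e1 : (a == "") = false := eq_false_of_ne_true h1
    rw [if_neg h1, if_neg h2']
    by_cases h3 : (PySem.Str.startswith a "-") = true
    · have hp : (!(a == "") && !(PySem.Str.startswith a "-")) = false := by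
        rw [h3]; simp
      rw [hp, if_neg (by simp), if_pos h3]
      exact ih
    · have e3 : (PySem.Str.startswith a "-") = false := eq_false_of_ne_true h3
      have hp : (!(a == "") && !(PySem.Str.startswith a "-")) = true := by
        rw [e1, e3]; rfl
      rw [hp, if_pos rfl, if_neg h3, List.cons_append, ih]

lemma pvAlt_eq_go (l : List String) : extract_cli_inputs_py_alt l = pvGo l := by
  induction l with
  | nil => simp [pvAlt_take_drop, pvGo]
  | cons a t ih =>
    rw [pvAlt_take_drop] at ih ⊢
    by_cases h2 : a == "--"
    · have ha : a = "--" := eq_of_beq h2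
      subst ha
      rw [PySem.List.index?_cons_self]
      simp [pvGo]
    · have hne : a ≠ "--" := ne_of_beq_false (eq_false_of_ne_true h2)
      rw [PySem.List.index?_cons_of_ne t hne]
      rcases ho : PySem.List.index? t "--" with _ | n <;> rw [ho] at ih
      · simp only [Option.map_none, Option.getD_none, List.length_cons,
          List.take_succ_cons, List.drop_succ_cons]
        exact pvCons_step a t t.length hne ih
      · simp only [Option.map_some, Option.getD_some,
          List.take_succ_cons, List.drop_succ_cons]
        exact pvCons_step a t n hne ih

-- ===== VERDICT (by name: the statement is the Claim_ definition above) =====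
theorem extract_cli_inputs_py_spec : Claim_equal_extract_cli_inputs_py := by
  intro raw_args _
  show extract_cli_inputs_py raw_args = extract_cli_inputs_py_alt raw_args
  rw [extract_cli_inputs_py, pvFoldA_false, pvAlt_eq_go, List.nil_append]
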